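-- pv_equiv track=rewrite | github.com/izaxs/algo | pycode/other/max_product_uc.py | countCompanies
-- ===== SOURCE A (Python) =====
-- from heapq import nlargest
--
-- Node = tuple[int, int]
--
-- def getRoot(rootMap: dict[Node, Node], node: Node) -> Node:
--     while node in rootMap and rootMap[node] != node:
--         node = rootMap[node]
--     return node
--
-- def buildRootMap(friends_from: list[int], friends_to: list[int], friends_company: list[int]) -> dict[Node, Node]:
--     rootMap: dict[Node, Node] = {}
--     n = len(friends_from)
--     for i in range(n):
--         p1 = (friends_company[i], friends_from[i])
--         p2 = (friends_company[i], friends_to[i])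
--         root1, root2 = getRoot(rootMap, p1), getRoot(rootMap, p2)
--         rootMap[root1] = root2
--     return rootMap
--
-- def getMaxGroups(rootMap: dict[Node, Node]) -> list[list[int]]:
--     # groupMap: root -> list(person_id)
--     groupMap: dict[Node, set[int]] = {}
--     for c, p in rootMap.items():
--         root = getRoot(rootMap, p)
--         group = groupMap.setdefault(root, set())
--         group.add(c[1])
--         group.add(root[1])
--     groups: list[list[int]] = []
--     lenMax = 0
--     for _, v in groupMap.items():
--         if len(v) > lenMax:
--             groups.clear()
--             groups.append(list(v))
--             lenMax = len(v)
--         elif len(v) == lenMax: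
--             groups.append(list(v))
--     return groups
--
-- def countCompanies(num_friends: int, friends_from: list[int], friends_to: list[int], friends_company: list[int]):
--     rootMap = buildRootMap(friends_from, friends_to, friends_company)
--     groups = getMaxGroups(rootMap)
--     maxProduct = 0
--     for g in groups:
--         n1, n2 = nlargest(2, g)
--         maxProduct = max(maxProduct, n1*n2)
--     return maxProduct
-- ===== SOURCE B (Python) =====
-- def countCompanies(num_friends, friends_from, friends_to, friends_company):
--     # disjoint groups kept as an explicit list of (company, set-of-person-ids) blocks,
--     # merged by a single sweep per edge (no root pointers / pointer chasing as in A)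
--     comps = []
--     for f, t, c in zip(friends_from, friends_to, friends_company):
--         merged = {f, t}
--         rest = []
--         for cc, members in comps:
--             if cc == c and (f in members or t in members):
--                 merged |= members
--             else:
--                 rest.append((cc, members))
--         rest.append((c, merged))
--         comps = rest
--     if not comps:
--         return 0
--     top = max(len(s) for _, s in comps)
--     best = 0
--     for _, s in comps:
--         if len(s) == top:
--             srt = sorted(s)
--             best = max(best, srt[-1] * srt[-2])
--     return best
-- ===== Notes on version B (the rewrite author's own statement) =====
-- stated objective: alternative
-- what changed: A chains root pointers in a hand-rolled union-find dict and then re-derives groups from the pointer map; B keeps the partition explicitly as a list of (company, person-set) blocks merged by one sweep per edge, so no root-following or group reconstruction pass exists.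
import Mathlib
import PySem

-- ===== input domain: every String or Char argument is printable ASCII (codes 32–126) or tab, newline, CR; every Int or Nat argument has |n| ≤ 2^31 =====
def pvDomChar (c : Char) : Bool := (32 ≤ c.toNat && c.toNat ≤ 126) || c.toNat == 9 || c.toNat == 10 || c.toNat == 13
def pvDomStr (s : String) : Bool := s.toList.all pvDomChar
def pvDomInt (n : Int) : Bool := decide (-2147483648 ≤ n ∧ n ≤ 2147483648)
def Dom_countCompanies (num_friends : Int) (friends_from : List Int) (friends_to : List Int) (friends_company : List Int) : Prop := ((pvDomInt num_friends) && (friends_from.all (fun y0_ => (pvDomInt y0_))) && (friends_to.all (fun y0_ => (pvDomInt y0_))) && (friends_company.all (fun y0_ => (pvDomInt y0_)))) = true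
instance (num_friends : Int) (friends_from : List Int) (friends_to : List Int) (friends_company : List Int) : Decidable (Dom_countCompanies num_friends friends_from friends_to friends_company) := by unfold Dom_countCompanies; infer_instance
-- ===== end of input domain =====

-- B replaces A's hand-rolled root-pointer union-find (and its group-reconstruction pass) by an
-- explicit list of (company, person-set) blocks merged in one sweep per edge; same return value.

-- ===== PORT A =====

-- getRoot's `while` loop, with fuel: on the maps buildRootMap constructs, chains never revisit a
-- key, so they are shorter than the key count and fuel `size + 1` reproduces the loop exactly
-- (proved below, pvGetRoot_eq_of_root).
def pvGetRootF (fuel : Nat) (m : PySem.Dict (Int × Int) (Int × Int)) (node : Int × Int) : Int × Int :=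
  match fuel with
  | 0 => node
  | f + 1 =>
    match m.get? node with
    | none => node
    | some p => if p = node then node else pvGetRootF f m p

def pvGetRoot (m : PySem.Dict (Int × Int) (Int × Int)) (node : Int × Int) : Int × Int :=
  pvGetRootF (m.size + 1) m node

def pvBuildRootMap (ff ft fc : List Int) : PySem.Dict (Int × Int) (Int × Int) :=
  (List.range ff.length).foldl
    (fun m (i : Nat) =>
      let p1 : Int × Int := (PySem.List.pyGetD fc (i : Int) 0, PySem.List.pyGetD ff (i : Int) 0)
      let p2 : Int × Int := (PySem.List.pyGetD fc (i : Int) 0, PySem.List.pyGetD ft (i : Int) 0)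
      let root1 := pvGetRoot m p1
      let root2 := pvGetRoot m p2
      m.insert root1 root2)
    PySem.Dict.empty

def pvGetMaxGroups (m : PySem.Dict (Int × Int) (Int × Int)) : List (List Int) :=
  let groupMap : PySem.Dict (Int × Int) (PySem.Set Int) :=
    m.items.foldl
      (fun g cp =>
        let root := pvGetRoot m cp.2
        let group := (g.get? root).getD PySem.Set.empty
        g.insert root (PySem.Set.add (PySem.Set.add group cp.1.2) root.2))
      PySem.Dict.empty
  (groupMap.items.foldl
    (fun (acc : List (List Int) × Nat) kv =>
      if kv.2.length > acc.2 then ([(kv.2 : List Int)], kv.2.length)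
      else if kv.2.length = acc.2 then (acc.1 ++ [(kv.2 : List Int)], acc.2)
      else acc)
    ([], 0)).1

def countCompanies (num_friends : Int) (friends_from : List Int) (friends_to : List Int) (friends_company : List Int) : Int :=
  let rootMap := pvBuildRootMap friends_from friends_to friends_company
  let groups := pvGetMaxGroups rootMap
  groups.foldl
    (fun maxProduct g =>
      match (PySem.List.sorted g (fun x => x) true).take 2 with
      | [n1, n2] => max maxProduct (n1 * n2)
      | _ => maxProduct)
    0

-- ===== PORT B =====

def pvMergeStep (comps : List (Int × PySem.Set Int)) (f t c : Int) : List (Int × PySem.Set Int) :=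
  let acc := comps.foldl
    (fun (acc : List (Int × PySem.Set Int) × PySem.Set Int) e =>
      if e.1 = c ∧ (f ∈ (e.2 : List Int) ∨ t ∈ (e.2 : List Int)) then
        (acc.1, PySem.Set.union acc.2 (e.2 : List Int))
      else (acc.1 ++ [e], acc.2))
    ([], PySem.Set.ofList [f, t])
  acc.1 ++ [(c, acc.2)]

def pvStepB (cs : List (Int × PySem.Set Int)) (e : Int × Int × Int) : List (Int × PySem.Set Int) :=
  pvMergeStep cs e.1 e.2.1 e.2.2

def countCompanies_alt (num_friends : Int) (friends_from : List Int) (friends_to : List Int) (friends_company : List Int) : Int :=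
  let comps := (friends_from.zip (friends_to.zip friends_company)).foldl pvStepB []
  match comps with
  | [] => 0
  | _ :: _ =>
    let top := (comps.map (fun e => (e.2 : List Int).length)).foldl max 0
    comps.foldl
      (fun best e =>
        if (e.2 : List Int).length = top then
          match PySem.List.pyGet? (PySem.List.sorted (e.2 : List Int) (fun x => x) false) (-1),
                PySem.List.pyGet? (PySem.List.sorted (e.2 : List Int) (fun x => x) false) (-2) with
          | some a, some b => max best (a * b)
          | _, _ => best
        else best)
      0

-- ===== PRECONDITION & SPEC =====

-- Pre_ excludes exactly the inputs on which A raises: an IndexError when friends_to or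
-- friends_company is shorter than friends_from, and a ValueError (unpacking nlargest of a
-- one-person group) when there is at least one edge and every edge is a self-loop f == t.
def Pre_countCompanies (num_friends : Int) (friends_from : List Int) (friends_to : List Int) (friends_company : List Int) : Prop :=
  friends_from.length ≤ friends_to.length ∧ friends_from.length ≤ friends_company.length ∧
    (friends_from ≠ [] → ∃ i < friends_from.length, friends_from.getD i 0 ≠ friends_to.getD i 0)

instance (num_friends : Int) (friends_from : List Int) (friends_to : List Int) (friends_company : List Int) : Decidable (Pre_countCompanies num_friends friends_from friends_to friends_company) := by unfold Pre_countCompanies; infer_instance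

def pvWitness_countCompanies : Int × List Int × List Int × List Int := (2, [1, 2], [2, 3], [7, 7])

def Spec_countCompanies (num_friends : Int) (friends_from : List Int) (friends_to : List Int) (friends_company : List Int) (out : Int) : Prop := out = countCompanies_alt num_friends friends_from friends_to friends_company
instance (num_friends : Int) (friends_from : List Int) (friends_to : List Int) (friends_company : List Int) (out : Int) : Decidable (Spec_countCompanies num_friends friends_from friends_to friends_company out) := by unfold Spec_countCompanies; infer_instance

-- ===== CLAIM (what is proved, stated in full; the proofs are below) =====
def Claim_equal_countCompanies : Prop := ∀ (num_friends : Int) (friends_from : List Int) (friends_to : List Int) (friends_company : List Int), Dom_countCompanies num_friends friends_from friends_to friends_company → Pre_countCompanies num_friends friends_from friends_to friends_company → Spec_countCompanies num_friends friends_from friends_to friends_company (countCompanies num_friends friends_from friends_to friends_company)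

-- ===== LEMMAS AND PROOFS =====

-- ===== Section 1: correctness of the fueled root-chase =====

def pvRoot (m : PySem.Dict (Int × Int) (Int × Int)) (r : Int × Int) : Prop :=
  m.get? r = none ∨ m.get? r = some r

theorem pvGetRootF_of_root {m : PySem.Dict (Int × Int) (Int × Int)} {x : Int × Int}
    (h : pvRoot m x) (f : Nat) : pvGetRootF f m x = x := by
  cases f with
  | zero => rfl
  | succ f =>
    rcases h with h | h <;> simp [pvGetRootF, h]

theorem pvGetRootF_step {m : PySem.Dict (Int × Int) (Int × Int)} {x p : Int × Int}
    (h : m.get? x = some p) (hne : p ≠ x) (f : Nat) :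
    pvGetRootF (f + 1) m x = pvGetRootF f m p := by
  simp [pvGetRootF, h, hne]

theorem pvStab {m : PySem.Dict (Int × Int) (Int × Int)} :
    ∀ (f : Nat) (x : Int × Int), pvRoot m (pvGetRootF f m x) →
      pvGetRootF (f + 1) m x = pvGetRootF f m x := by
  intro f
  induction f with
  | zero =>
    intro x h
    simpa [pvGetRootF] using pvGetRootF_of_root h 1
  | succ f ih =>
    intro x h
    rcases hx : m.get? x with _ | p
    · simp [pvGetRootF, hx]
    · by_cases hpx : p = x
      · simp [pvGetRootF, hx, hpx]
      · have h' : pvRoot m (pvGetRootF f m p) := by rwa [pvGetRootF_step hx hpx f] at h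
        rw [pvGetRootF_step hx hpx (f+1), pvGetRootF_step hx hpx f]
        exact ih p h'

theorem pvStabGe {m : PySem.Dict (Int × Int) (Int × Int)} {f : Nat} {x : Int × Int}
    (h : pvRoot m (pvGetRootF f m x)) :
    ∀ g, f ≤ g → pvGetRootF g m x = pvGetRootF f m x := by
  intro g
  induction g with
  | zero =>
    intro hg
    have : f = 0 := by omega
    subst this; rfl
  | succ g ih =>
    intro hg
    rcases Nat.lt_or_ge f (g+1) with hlt | hge
    · have hfg : f ≤ g := by omega
      have := ih hfg
      rw [← this] at h ⊢
      rw [pvStab g x h, this]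
    · have : f = g + 1 := by omega
      subst this; rfl

def pvTrace (fuel : Nat) (m : PySem.Dict (Int × Int) (Int × Int)) (node : Int × Int) : List (Int × Int) :=
  match fuel with
  | 0 => []
  | f + 1 =>
    match m.get? node with
    | none => []
    | some p => if p = node then [] else node :: pvTrace f m p

theorem pvTrace_step {m : PySem.Dict (Int × Int) (Int × Int)} {x p : Int × Int}
    (h : m.get? x = some p) (hne : p ≠ x) (f : Nat) :
    pvTrace (f + 1) m x = x :: pvTrace f m p := by
  conv_lhs => rw [pvTrace]
  rw [h]
  simp [hne]

theorem pvTraceStab {m : PySem.Dict (Int × Int) (Int × Int)} :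
    ∀ (f : Nat) (x : Int × Int), pvRoot m (pvGetRootF f m x) →
      pvTrace (f + 1) m x = pvTrace f m x := by
  intro f
  induction f with
  | zero =>
    intro x h
    rcases h with h | h <;> simp [pvTrace, pvGetRootF] at h ⊢ <;> simp [h]
  | succ f ih =>
    intro x h
    rcases hx : m.get? x with _ | p
    · simp [pvTrace, hx]
    · by_cases hpx : p = x
      · simp [pvTrace, hx, hpx]
      · have h' : pvRoot m (pvGetRootF f m p) := by rwa [pvGetRootF_step hx hpx f] at h
        rw [pvTrace_step hx hpx (f+1), pvTrace_step hx hpx f, ih p h']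

theorem pvTraceFuel {m : PySem.Dict (Int × Int) (Int × Int)} :
    ∀ (f : Nat) (x : Int × Int), pvRoot m (pvGetRootF f m x) →
      pvGetRootF ((pvTrace f m x).length + 1) m x = pvGetRootF f m x := by
  intro f
  induction f with
  | zero =>
    intro x h
    simp only [pvTrace, List.length_nil, Nat.zero_add]
    exact pvGetRootF_of_root h 1
  | succ f ih =>
    intro x h
    rcases hx : m.get? x with _ | p
    · have : pvRoot m x := Or.inl hx
      rw [pvGetRootF_of_root this _, pvGetRootF_of_root this _]
    · by_cases hpx : p = x
      · have : pvRoot m x := Or.inr (hpx ▸ hx)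
        rw [pvGetRootF_of_root this _, pvGetRootF_of_root this _]
      · have h' : pvRoot m (pvGetRootF f m p) := by rwa [pvGetRootF_step hx hpx f] at h
        simp only [pvTrace, hx, if_neg hpx, List.length_cons]
        rw [pvGetRootF_step hx hpx ((pvTrace f m p).length + 1), ih p h',
            pvGetRootF_step hx hpx f]

theorem pvTraceMem {m : PySem.Dict (Int × Int) (Int × Int)} :
    ∀ (f : Nat) (x : Int × Int), pvRoot m (pvGetRootF f m x) →
      ∀ z ∈ pvTrace f m x, pvRoot m (pvGetRootF f m z) ∧
        (pvTrace f m z).length ≤ (pvTrace f m x).length := by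
  intro f
  induction f with
  | zero => intro x h z hz; simp [pvTrace] at hz
  | succ f ih =>
    intro x h z hz
    rcases hx : m.get? x with _ | p
    · simp [pvTrace, hx] at hz
    · by_cases hpx : p = x
      · simp [pvTrace, hx, hpx] at hz
      · simp only [pvTrace, hx, if_neg hpx, List.mem_cons] at hz
        have h' : pvRoot m (pvGetRootF f m p) := by rwa [pvGetRootF_step hx hpx f] at h
        rcases hz with rfl | hz
        · exact ⟨h, le_refl _⟩
        · obtain ⟨hr, hl⟩ := ih p h' z hz
          refine ⟨by rwa [pvStab f z hr], ?_⟩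
          rw [pvTraceStab f z hr]
          simp only [pvTrace, hx, if_neg hpx, List.length_cons]
          omega

theorem pvTraceNodup {m : PySem.Dict (Int × Int) (Int × Int)} :
    ∀ (f : Nat) (x : Int × Int), pvRoot m (pvGetRootF f m x) →
      (pvTrace f m x).Nodup := by
  intro f
  induction f with
  | zero => intro x _; simp [pvTrace]
  | succ f ih =>
    intro x h
    rcases hx : m.get? x with _ | p
    · simp [pvTrace, hx]
    · by_cases hpx : p = x
      · simp [pvTrace, hx, hpx]
      · have h' : pvRoot m (pvGetRootF f m p) := by rwa [pvGetRootF_step hx hpx f] at h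
        simp only [pvTrace, hx, if_neg hpx, List.nodup_cons]
        refine ⟨?_, ih p h'⟩
        intro hmem
        obtain ⟨hrz, hlz⟩ := pvTraceMem f p h' x hmem
        have hstab : pvTrace (f + 1) m x = pvTrace f m x := pvTraceStab f x hrz
        have hx1 : pvTrace (f + 1) m x = x :: pvTrace f m p := pvTrace_step hx hpx f
        rw [hx1] at hstab
        have : (pvTrace f m x).length = (pvTrace f m p).length + 1 := by
          rw [← hstab]; simp
        omega

theorem pvTraceKeys {m : PySem.Dict (Int × Int) (Int × Int)} :
    ∀ (f : Nat) (x : Int × Int), ∀ z ∈ pvTrace f m x, z ∈ m.keys := by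
  intro f
  induction f with
  | zero => intro x z hz; simp [pvTrace] at hz
  | succ f ih =>
    intro x z hz
    rcases hx : m.get? x with _ | p
    · simp [pvTrace, hx] at hz
    · by_cases hpx : p = x
      · simp [pvTrace, hx, hpx] at hz
      · simp only [pvTrace, hx, if_neg hpx, List.mem_cons] at hz
        rcases hz with rfl | hz
        · have hi := PySem.Dict.mem_items_of_get?_eq_some m hx
          exact PySem.Dict.mem_keys_of_mem_items m hi
        · exact ih p z hz

theorem pvKeysLength (m : PySem.Dict (Int × Int) (Int × Int)) : m.keys.length = m.size := by
  simp [PySem.Dict.keys, PySem.Dict.size]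

-- any successful run succeeds within the standard fuel m.size + 1
theorem pvGetRoot_eq_of_root {m : PySem.Dict (Int × Int) (Int × Int)} {f : Nat} {x : Int × Int}
    (h : pvRoot m (pvGetRootF f m x)) :
    pvGetRoot m x = pvGetRootF f m x ∧ pvRoot m (pvGetRoot m x) := by
  have hnd := pvTraceNodup f x h
  have hsub : pvTrace f m x ⊆ m.keys := fun z hz => pvTraceKeys f x z hz
  have hlen : (pvTrace f m x).length ≤ m.size := by
    have h1 : (pvTrace f m x).toFinset.card = (pvTrace f m x).length :=
      List.toFinset_card_of_nodup hnd
    have h2 : (pvTrace f m x).toFinset ⊆ m.keys.toFinset := by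
      intro a ha
      simp only [List.mem_toFinset] at ha ⊢
      exact hsub ha
    have h3 := Finset.card_le_card h2
    have h4 := m.keys.toFinset_card_le
    rw [pvKeysLength] at h4
    omega
  have hfuel := pvTraceFuel f x h
  have hroot' : pvRoot m (pvGetRootF ((pvTrace f m x).length + 1) m x) := by rwa [hfuel]
  have := pvStabGe hroot' (m.size + 1) (by omega)
  unfold pvGetRoot
  rw [this, hfuel]
  exact ⟨rfl, h⟩

def pvWFd (m : PySem.Dict (Int × Int) (Int × Int)) : Prop :=
  ∀ x, pvRoot m (pvGetRoot m x)

theorem pvWFd_empty : pvWFd PySem.Dict.empty := by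
  intro x
  left
  have : pvGetRoot PySem.Dict.empty x = x := pvGetRootF_of_root (Or.inl (by simp)) _
  rw [this]; simp

theorem pvGetRoot_of_root {m : PySem.Dict (Int × Int) (Int × Int)} {r : Int × Int}
    (h : pvRoot m r) : pvGetRoot m r = r := pvGetRootF_of_root h _

theorem pvGetRoot_step {m : PySem.Dict (Int × Int) (Int × Int)} {x p : Int × Int}
    (hwf : pvWFd m) (h : m.get? x = some p) : pvGetRoot m x = pvGetRoot m p := by
  by_cases hpx : p = x
  · subst hpx; rfl
  · have hsucc : pvRoot m (pvGetRoot m x) := hwf x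
    unfold pvGetRoot at hsucc ⊢
    rw [pvGetRootF_step h hpx m.size] at hsucc ⊢
    exact (pvStab m.size p hsucc).symm

-- a root value is the node itself or some stored value of the map
theorem pvGetRootF_self_or_val {m : PySem.Dict (Int × Int) (Int × Int)} :
    ∀ (f : Nat) (x : Int × Int),
      pvGetRootF f m x = x ∨ ∃ k, m.get? k = some (pvGetRootF f m x) := by
  intro f
  induction f with
  | zero => intro x; left; rfl
  | succ f ih =>
    intro x
    rcases hx : m.get? x with _ | p
    · left; simp [pvGetRootF, hx]
    · by_cases hpx : p = x
      · left; simp [pvGetRootF, hx, hpx]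
      · rw [pvGetRootF_step hx hpx f]
        rcases ih p with h | h
        · right; exact ⟨x, by rwa [h]⟩
        · right; exact h

-- ===== Section 2: effect of a union step on every root =====

theorem pvRoot_insert_of_ne {m : PySem.Dict (Int × Int) (Int × Int)} {r1 r2 x : Int × Int}
    (hx : pvRoot m x) (hne : x ≠ r1) : pvRoot (m.insert r1 r2) x := by
  rcases hx with h | h
  · left; rwa [PySem.Dict.get?_insert_of_ne m r2 hne]
  · right; rwa [PySem.Dict.get?_insert_of_ne m r2 hne]

theorem pvInsBase {m : PySem.Dict (Int × Int) (Int × Int)} {r1 r2 : Int × Int}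
    (hr2 : pvRoot m r2) {x : Int × Int} (hx : pvRoot m x) :
    ∃ g, pvRoot (m.insert r1 r2) (pvGetRootF g (m.insert r1 r2) x) ∧
      pvGetRootF g (m.insert r1 r2) x = (if x = r1 then r2 else x) := by
  by_cases hxr : x = r1
  · subst hxr
    by_cases h21 : r2 = x
    · refine ⟨1, ?_, ?_⟩ <;>
        simp [pvGetRootF, PySem.Dict.get?_insert_self, pvRoot, h21]
    · have hst : (m.insert x r2).get? x = some r2 := PySem.Dict.get?_insert_self m x r2
      have hroot2 : pvRoot (m.insert x r2) r2 := pvRoot_insert_of_ne hr2 h21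
      refine ⟨2, ?_, ?_⟩
      · rw [pvGetRootF_step hst h21 1, pvGetRootF_of_root hroot2 1]
        exact hroot2
      · rw [pvGetRootF_step hst h21 1, pvGetRootF_of_root hroot2 1]
        simp
  · have hroot : pvRoot (m.insert r1 r2) x := pvRoot_insert_of_ne hx hxr
    refine ⟨1, ?_, ?_⟩
    · rw [pvGetRootF_of_root hroot 1]; exact hroot
    · rw [pvGetRootF_of_root hroot 1]; simp [hxr]

theorem pvInsCore {m : PySem.Dict (Int × Int) (Int × Int)} {r1 r2 : Int × Int}
    (hr1 : pvRoot m r1) (hr2 : pvRoot m r2) :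
    ∀ (f : Nat) (x : Int × Int), pvRoot m (pvGetRootF f m x) →
      ∃ g, pvRoot (m.insert r1 r2) (pvGetRootF g (m.insert r1 r2) x) ∧
        pvGetRootF g (m.insert r1 r2) x =
          (if pvGetRootF f m x = r1 then r2 else pvGetRootF f m x) := by
  intro f
  induction f with
  | zero => intro x h; exact pvInsBase hr2 h
  | succ f ih =>
    intro x h
    rcases hx : m.get? x with _ | p
    · have hroot : pvRoot m x := Or.inl hx
      rw [pvGetRootF_of_root hroot (f+1)]
      exact pvInsBase hr2 hroot
    · by_cases hpx : p = x
      · have hroot : pvRoot m x := Or.inr (hpx ▸ hx)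
        rw [pvGetRootF_of_root hroot (f+1)]
        exact pvInsBase hr2 hroot
      · have h' : pvRoot m (pvGetRootF f m p) := by rwa [pvGetRootF_step hx hpx f] at h
        obtain ⟨g, hg1, hg2⟩ := ih p h'
        have hxr1 : x ≠ r1 := by
          intro heq
          subst heq
          rcases hr1 with hh | hh <;> rw [hx] at hh
          · simp at hh
          · exact hpx (by injection hh)
        have hst : (m.insert r1 r2).get? x = some p := by
          rw [PySem.Dict.get?_insert_of_ne m r2 hxr1]; exact hx
        refine ⟨g + 1, ?_, ?_⟩
        · rwa [pvGetRootF_step hst hpx g]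
        · rw [pvGetRootF_step hst hpx g, pvGetRootF_step hx hpx f]
          exact hg2

theorem pvGetRoot_insert {m : PySem.Dict (Int × Int) (Int × Int)} {r1 r2 : Int × Int}
    (hwf : pvWFd m) (hr1 : pvRoot m r1) (hr2 : pvRoot m r2) :
    pvWFd (m.insert r1 r2) ∧
      ∀ x, pvGetRoot (m.insert r1 r2) x =
        (if pvGetRoot m x = r1 then r2 else pvGetRoot m x) := by
  have key : ∀ x, pvRoot (m.insert r1 r2) (pvGetRoot (m.insert r1 r2) x) ∧
      pvGetRoot (m.insert r1 r2) x = (if pvGetRoot m x = r1 then r2 else pvGetRoot m x) := by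
    intro x
    obtain ⟨g, hg1, hg2⟩ := pvInsCore hr1 hr2 (m.size + 1) x (hwf x)
    obtain ⟨heq, hroot⟩ := pvGetRoot_eq_of_root hg1
    refine ⟨hroot, ?_⟩
    rw [heq, hg2]
    rfl
  exact ⟨fun x => (key x).1, fun x => (key x).2⟩

def pvStepA (m : PySem.Dict (Int × Int) (Int × Int)) (e : Int × Int × Int) :
    PySem.Dict (Int × Int) (Int × Int) :=
  m.insert (pvGetRoot m (e.2.2, e.1)) (pvGetRoot m (e.2.2, e.2.1))

theorem pvStepA_props {m : PySem.Dict (Int × Int) (Int × Int)} (hwf : pvWFd m) (e : Int × Int × Int) :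
    pvWFd (pvStepA m e) ∧
      ∀ x, pvGetRoot (pvStepA m e) x =
        (if pvGetRoot m x = pvGetRoot m (e.2.2, e.1) then pvGetRoot m (e.2.2, e.2.1)
         else pvGetRoot m x) := by
  have hr1 : pvRoot m (pvGetRoot m (e.2.2, e.1)) := hwf _
  have hr2 : pvRoot m (pvGetRoot m (e.2.2, e.2.1)) := hwf _
  exact pvGetRoot_insert hwf hr1 hr2

def pvTouched (f t c : Int) (e : Int × PySem.Set Int) : Prop :=
  e.1 = c ∧ (f ∈ (e.2 : List Int) ∨ t ∈ (e.2 : List Int))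

theorem pvMergeAux (f t c : Int) :
    ∀ (comps : List (Int × PySem.Set Int)) (r0 : List (Int × PySem.Set Int)) (s0 : PySem.Set Int),
      s0.Nodup →
      (∀ e', e' ∈ (comps.foldl
          (fun (acc : List (Int × PySem.Set Int) × PySem.Set Int) e =>
            if e.1 = c ∧ (f ∈ (e.2 : List Int) ∨ t ∈ (e.2 : List Int)) then
              (acc.1, PySem.Set.union acc.2 (e.2 : List Int))
            else (acc.1 ++ [e], acc.2)) (r0, s0)).1 ↔
          e' ∈ r0 ∨ (e' ∈ comps ∧ ¬ pvTouched f t c e')) ∧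
      ((comps.foldl
          (fun (acc : List (Int × PySem.Set Int) × PySem.Set Int) e =>
            if e.1 = c ∧ (f ∈ (e.2 : List Int) ∨ t ∈ (e.2 : List Int)) then
              (acc.1, PySem.Set.union acc.2 (e.2 : List Int))
            else (acc.1 ++ [e], acc.2)) (r0, s0)).2.Nodup ∧
      (∀ q, q ∈ ((comps.foldl
          (fun (acc : List (Int × PySem.Set Int) × PySem.Set Int) e =>
            if e.1 = c ∧ (f ∈ (e.2 : List Int) ∨ t ∈ (e.2 : List Int)) then
              (acc.1, PySem.Set.union acc.2 (e.2 : List Int))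
            else (acc.1 ++ [e], acc.2)) (r0, s0)).2 : List Int) ↔
          q ∈ (s0 : List Int) ∨ ∃ e ∈ comps, pvTouched f t c e ∧ q ∈ (e.2 : List Int))) := by
  intro comps
  induction comps with
  | nil =>
    intro r0 s0 hnd
    refine ⟨fun e' => ?_, hnd, fun q => ?_⟩ <;> simp
  | cons e es ih =>
    intro r0 s0 hnd
    simp only [List.foldl_cons]
    by_cases htch : pvTouched f t c e
    · rw [if_pos ⟨htch.1, htch.2⟩]
      obtain ⟨h1, h2, h3⟩ := ih r0 (PySem.Set.union s0 (e.2 : List Int))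
        (PySem.Set.nodup_union s0 (e.2 : List Int) hnd)
      refine ⟨fun e' => ?_, h2, fun q => ?_⟩
      · rw [h1 e']
        constructor
        · rintro (h | h)
          · exact Or.inl h
          · exact Or.inr ⟨List.mem_cons_of_mem _ h.1, h.2⟩
        · rintro (h | ⟨hm, hnt⟩)
          · exact Or.inl h
          · rcases List.mem_cons.mp hm with rfl | hm
            · exact absurd htch hnt
            · exact Or.inr ⟨hm, hnt⟩
      · rw [h3 q, PySem.Set.mem_union]
        constructor
        · rintro ((h | h) | ⟨e', he', ht', hq⟩)
          · exact Or.inl h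
          · exact Or.inr ⟨e, List.mem_cons_self, htch, h⟩
          · exact Or.inr ⟨e', List.mem_cons_of_mem _ he', ht', hq⟩
        · rintro (h | ⟨e', he', ht', hq⟩)
          · exact Or.inl (Or.inl h)
          · rcases List.mem_cons.mp he' with rfl | he'
            · exact Or.inl (Or.inr hq)
            · exact Or.inr ⟨e', he', ht', hq⟩
    · rw [if_neg (by exact fun hc => htch hc)]
      obtain ⟨h1, h2, h3⟩ := ih (r0 ++ [e]) s0 hnd
      refine ⟨fun e' => ?_, h2, fun q => ?_⟩
      · rw [h1 e']
        constructor
        · rintro (h | h)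
          · rcases List.mem_append.mp h with h | h
            · exact Or.inl h
            · rcases List.mem_singleton.mp h with rfl
              exact Or.inr ⟨List.mem_cons_self, htch⟩
          · exact Or.inr ⟨List.mem_cons_of_mem _ h.1, h.2⟩
        · rintro (h | ⟨hm, hnt⟩)
          · exact Or.inl (List.mem_append.mpr (Or.inl h))
          · rcases List.mem_cons.mp hm with rfl | hm
            · exact Or.inl (List.mem_append.mpr (Or.inr (List.mem_singleton.mpr rfl)))
            · exact Or.inr ⟨hm, hnt⟩
      · rw [h3 q]
        constructor
        · rintro (h | ⟨e', he', ht', hq⟩)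
          · exact Or.inl h
          · exact Or.inr ⟨e', List.mem_cons_of_mem _ he', ht', hq⟩
        · rintro (h | ⟨e', he', ht', hq⟩)
          · exact Or.inl h
          · rcases List.mem_cons.mp he' with rfl | he'
            · exact absurd ht' htch
            · exact Or.inr ⟨e', he', ht', hq⟩

theorem pvMergeStep_char (comps : List (Int × PySem.Set Int)) (f t c : Int) :
    ∃ M : PySem.Set Int, M.Nodup ∧ (M : List Int) ≠ [] ∧
      (∀ q, q ∈ (M : List Int) ↔
        q = f ∨ q = t ∨ ∃ e ∈ comps, pvTouched f t c e ∧ q ∈ (e.2 : List Int)) ∧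
      (∀ e', e' ∈ pvMergeStep comps f t c ↔
        (e' ∈ comps ∧ ¬ pvTouched f t c e') ∨ e' = (c, M)) := by
  obtain ⟨h1, h2, h3⟩ := pvMergeAux f t c comps [] (PySem.Set.ofList [f, t])
    (PySem.Set.nodup_ofList [f, t])
  refine ⟨_, h2, ?_, ?_, ?_⟩
  · intro hnil
    have : f ∈ ([] : List Int) := by
      rw [← hnil]
      rw [h3 f]
      left
      rw [PySem.Set.mem_ofList]
      simp
    simp at this
  · intro q
    rw [h3 q, PySem.Set.mem_ofList]
    constructor
    · rintro (h | h)
      · rcases List.mem_cons.mp h with rfl | h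
        · exact Or.inl rfl
        · exact Or.inr (Or.inl (by simpa using h))
      · exact Or.inr (Or.inr h)
    · rintro (rfl | rfl | h)
      · exact Or.inl (by simp)
      · exact Or.inl (by simp)
      · exact Or.inr h
  · intro e'
    unfold pvMergeStep
    rw [List.mem_append]
    rw [h1 e']
    simp

structure PvInv (m : PySem.Dict (Int × Int) (Int × Int))
    (comps : List (Int × PySem.Set Int)) (S : Int × Int → Prop) : Prop where
  wf : pvWFd m
  keysSeen : ∀ x v, m.get? x = some v → S x
  valsSeen : ∀ x v, m.get? x = some v → S v
  keysNodup : m.keys.Nodup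
  cover : ∀ x, S x → ∃ e ∈ comps, e.1 = x.1 ∧ x.2 ∈ (e.2 : List Int)
  bseen : ∀ e ∈ comps, ∀ q ∈ (e.2 : List Int), S (e.1, q)
  bsame : ∀ e ∈ comps, ∀ q ∈ (e.2 : List Int), ∀ q' ∈ (e.2 : List Int),
    pvGetRoot m (e.1, q) = pvGetRoot m (e.1, q')
  bexact : ∀ e ∈ comps, ∀ q ∈ (e.2 : List Int), ∀ y, S y →
    pvGetRoot m y = pvGetRoot m (e.1, q) → y.1 = e.1 ∧ y.2 ∈ (e.2 : List Int)
  comp : ∀ y, S y → (pvGetRoot m y).1 = y.1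
  bnodup : ∀ e ∈ comps, (e.2 : List Int).Nodup
  bne : ∀ e ∈ comps, (e.2 : List Int) ≠ []
  skv : ∀ x, S x → (∃ v, m.get? x = some v) ∨ (∃ k, m.get? k = some x)

theorem pvRootSeen {m : PySem.Dict (Int × Int) (Int × Int)} {comps S}
    (hI : PvInv m comps S) {y : Int × Int} (hy : S y) : S (pvGetRoot m y) := by
  rcases pvGetRootF_self_or_val (m.size + 1) y with h | ⟨k, hk⟩
  · unfold pvGetRoot; rw [h]; exact hy
  · exact hI.valsSeen k _ hk

theorem pvNotSeenRoot {m : PySem.Dict (Int × Int) (Int × Int)} {comps S}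
    (hI : PvInv m comps S) {y : Int × Int} (hy : ¬ S y) : pvGetRoot m y = y := by
  apply pvGetRoot_of_root
  rcases hk : m.get? y with _ | v
  · exact Or.inl hk
  · exact absurd (hI.keysSeen y v hk) hy

theorem pvInvStep {m : PySem.Dict (Int × Int) (Int × Int)}
    {comps : List (Int × PySem.Set Int)} {S : Int × Int → Prop}
    (hI : PvInv m comps S) (f t c : Int) :
    PvInv (pvStepA m (f, (t, c))) (pvMergeStep comps f t c)
      (fun x => S x ∨ x = (c, f) ∨ x = (c, t)) := by
  obtain ⟨M, hMnd, hMne, hMmem, hCmem⟩ := pvMergeStep_char comps f t c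
  set p1 : Int × Int := (c, f) with hp1
  set p2 : Int × Int := (c, t) with hp2
  set r1 := pvGetRoot m p1 with hr1d
  set r2 := pvGetRoot m p2 with hr2d
  obtain ⟨hwf', hGR⟩ := pvStepA_props hI.wf (f, (t, c))
  have hstep : pvStepA m (f, (t, c)) = m.insert r1 r2 := rfl
  -- (T3) both roots carry company c
  have hr1c : r1.1 = c := by
    by_cases h : S p1
    · have := hI.comp p1 h; simpa [hp1] using this
    · rw [hr1d, pvNotSeenRoot hI h]
  have hr2c : r2.1 = c := by
    by_cases h : S p2
    · have := hI.comp p2 h; simpa [hp2] using this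
    · rw [hr2d, pvNotSeenRoot hI h]
  -- (T1) members of touched blocks have root r1 or r2
  have hT1 : ∀ e ∈ comps, pvTouched f t c e → ∀ q ∈ (e.2 : List Int),
      pvGetRoot m (e.1, q) = r1 ∨ pvGetRoot m (e.1, q) = r2 := by
    rintro e he ⟨hec, hft⟩ q hq
    rcases hft with hf | ht
    · left; rw [hI.bsame e he q hq f hf, hec]
    · right; rw [hI.bsame e he q hq t ht, hec]
  -- (T2) members of untouched blocks have root ≠ r1 and ≠ r2
  have hT2 : ∀ e ∈ comps, ¬ pvTouched f t c e → ∀ q ∈ (e.2 : List Int),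
      pvGetRoot m (e.1, q) ≠ r1 ∧ pvGetRoot m (e.1, q) ≠ r2 := by
    intro e he hnt q hq
    constructor
    · intro heq
      by_cases hs : S p1
      · obtain ⟨h1, h2⟩ := hI.bexact e he q hq p1 hs (by rw [← hr1d, heq])
        exact hnt ⟨h1.symm ▸ rfl, Or.inl h2⟩
      · have hr1p : r1 = p1 := by rw [hr1d, pvNotSeenRoot hI hs]
        have : S (pvGetRoot m (e.1, q)) := pvRootSeen hI (hI.bseen e he q hq)
        rw [heq, hr1p] at this
        exact hs this
    · intro heq
      by_cases hs : S p2
      · obtain ⟨h1, h2⟩ := hI.bexact e he q hq p2 hs (by rw [← hr2d, heq])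
        exact hnt ⟨h1.symm ▸ rfl, Or.inr h2⟩
      · have hr2p : r2 = p2 := by rw [hr2d, pvNotSeenRoot hI hs]
        have : S (pvGetRoot m (e.1, q)) := pvRootSeen hI (hI.bseen e he q hq)
        rw [heq, hr2p] at this
        exact hs this
  -- the new-map root of every node, via the insert formula
  have hGR' : ∀ x, pvGetRoot (pvStepA m (f, (t, c))) x =
      (if pvGetRoot m x = r1 then r2 else pvGetRoot m x) := hGR
  -- (N1) every person of the merged block has new root r2
  have hN1 : ∀ q ∈ (M : List Int), pvGetRoot (pvStepA m (f, (t, c))) (c, q) = r2 := by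
    intro q hq
    rcases (hMmem q).mp hq with rfl | rfl | ⟨e, he, ht, hq'⟩
    · rw [hGR' p1, ← hr1d]; simp
    · rw [hGR' p2, ← hr2d]
      by_cases h : r2 = r1 <;> simp [h]
    · have := hT1 e he ht q hq'
      rw [ht.1] at this
      rw [hGR' (c, q)]
      rcases this with h | h
      · rw [h]; simp
      · rw [h]; by_cases h' : r2 = r1 <;> simp [h']
  -- untouched blocks keep their roots
  have hOld : ∀ e ∈ comps, ¬ pvTouched f t c e → ∀ q ∈ (e.2 : List Int),
      pvGetRoot (pvStepA m (f, (t, c))) (e.1, q) = pvGetRoot m (e.1, q) := by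
    intro e he hnt q hq
    rw [hGR' (e.1, q), if_neg (hT2 e he hnt q hq).1]
  have hSeenR1 : (S p1 → S r1) ∧ (¬ S p1 → r1 = p1) := by
    constructor
    · intro h; exact hr1d ▸ pvRootSeen hI h
    · intro h; rw [hr1d, pvNotSeenRoot hI h]
  have hSeenR2 : (S p2 → S r2) ∧ (¬ S p2 → r2 = p2) := by
    constructor
    · intro h; exact hr2d ▸ pvRootSeen hI h
    · intro h; rw [hr2d, pvNotSeenRoot hI h]
  have hS'r1 : S r1 ∨ r1 = p1 ∨ r1 = p2 := by
    by_cases h : S p1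
    · exact Or.inl (hSeenR1.1 h)
    · exact Or.inr (Or.inl (hSeenR1.2 h))
  have hS'r2 : S r2 ∨ r2 = p1 ∨ r2 = p2 := by
    by_cases h : S p2
    · exact Or.inl (hSeenR2.1 h)
    · exact Or.inr (Or.inr (hSeenR2.2 h))
  have hget' : ∀ x, (pvStepA m (f, (t, c))).get? x = if x = r1 then some r2 else m.get? x := by
    intro x
    rw [hstep]
    exact PySem.Dict.get?_insert m r1 x r2
  constructor
  case wf => exact hwf'
  case keysSeen =>
    intro x v h
    rw [hget' x] at h
    by_cases hx : x = r1
    · subst hx; exact hS'r1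
    · rw [if_neg hx] at h
      exact Or.inl (hI.keysSeen x v h)
  case valsSeen =>
    intro x v h
    rw [hget' x] at h
    by_cases hx : x = r1
    · rw [if_pos hx] at h
      injection h with h
      subst h
      exact hS'r2
    · rw [if_neg hx] at h
      exact Or.inl (hI.valsSeen x v h)
  case keysNodup =>
    rw [hstep]
    exact PySem.Dict.nodup_keys_insert m r1 r2 hI.keysNodup
  case cover =>
    rintro x (hx | rfl | rfl)
    · obtain ⟨e, he, he1, he2⟩ := hI.cover x hx
      by_cases ht : pvTouched f t c e
      · refine ⟨(c, M), (hCmem _).mpr (Or.inr rfl), ?_, ?_⟩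
        · simp [← he1, ht.1]
        · exact (hMmem x.2).mpr (Or.inr (Or.inr ⟨e, he, ht, he2⟩))
      · exact ⟨e, (hCmem e).mpr (Or.inl ⟨he, ht⟩), he1, he2⟩
    · exact ⟨(c, M), (hCmem _).mpr (Or.inr rfl), rfl, (hMmem f).mpr (Or.inl rfl)⟩
    · exact ⟨(c, M), (hCmem _).mpr (Or.inr rfl), rfl, (hMmem t).mpr (Or.inr (Or.inl rfl))⟩
  case bseen =>
    intro e he q hq
    rcases (hCmem e).mp he with ⟨he', hnt⟩ | rfl
    · exact Or.inl (hI.bseen e he' q hq)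
    · rcases (hMmem q).mp hq with rfl | rfl | ⟨e', he', ht', hq'⟩
      · exact Or.inr (Or.inl rfl)
      · exact Or.inr (Or.inr rfl)
      · have := hI.bseen e' he' q hq'
        rw [ht'.1] at this
        exact Or.inl this
  case bsame =>
    intro e he q hq q' hq'
    rcases (hCmem e).mp he with ⟨he', hnt⟩ | rfl
    · rw [hOld e he' hnt q hq, hOld e he' hnt q' hq']
      exact hI.bsame e he' q hq q' hq'
    · rw [hN1 q hq, hN1 q' hq']
  case bexact =>
    intro e he q hq y hy hroot
    rcases (hCmem e).mp he with ⟨he', hnt⟩ | rfl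
    · rw [hOld e he' hnt q hq] at hroot
      rcases hy with hy | rfl | rfl
      · have hGRy : pvGetRoot (pvStepA m (f, (t, c))) y = pvGetRoot m y := by
          rw [hGR' y]
          by_cases hcase : pvGetRoot m y = r1
          · exfalso
            rw [hGR' y, if_pos hcase] at hroot
            exact (hT2 e he' hnt q hq).2 hroot.symm
          · rw [if_neg hcase]
        rw [hGRy] at hroot
        exact hI.bexact e he' q hq y hy hroot
      · exfalso
        rw [hGR' p1, ← hr1d, if_pos rfl] at hroot
        exact (hT2 e he' hnt q hq).2 hroot.symm
      · exfalso
        have : pvGetRoot (pvStepA m (f, (t, c))) p2 = r2 := by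
          rw [hGR' p2, ← hr2d]
          by_cases h : r2 = r1 <;> simp [h]
        rw [this] at hroot
        exact (hT2 e he' hnt q hq).2 hroot.symm
    · rw [hN1 q hq] at hroot
      rcases hy with hy | rfl | rfl
      · have : pvGetRoot m y = r1 ∨ pvGetRoot m y = r2 := by
          rw [hGR' y] at hroot
          by_cases hcase : pvGetRoot m y = r1
          · exact Or.inl hcase
          · rw [if_neg hcase] at hroot
            exact Or.inr hroot
        obtain ⟨ey, hey, hey1, hey2⟩ := hI.cover y hy
        have hyeq : (ey.1, y.2) = y := by
          rw [hey1]
        have hty : pvTouched f t c ey := by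
          by_contra hnt
          have := hT2 ey hey hnt y.2 hey2
          rw [hyeq] at this
          rcases this with ⟨ha, hb⟩
          rcases ‹pvGetRoot m y = r1 ∨ pvGetRoot m y = r2› with h | h
          · exact ha h
          · exact hb h
        constructor
        · rw [← hey1, hty.1]
        · exact (hMmem y.2).mpr (Or.inr (Or.inr ⟨ey, hey, hty, hey2⟩))
      · exact ⟨rfl, (hMmem f).mpr (Or.inl rfl)⟩
      · exact ⟨rfl, (hMmem t).mpr (Or.inr (Or.inl rfl))⟩
  case comp =>
    rintro y (hy | rfl | rfl)
    · rw [hGR' y]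
      by_cases hcase : pvGetRoot m y = r1
      · rw [if_pos hcase, hr2c]
        have := hI.comp y hy
        rw [hcase, hr1c] at this
        exact this
      · rw [if_neg hcase]
        exact hI.comp y hy
    · rw [hGR' p1, ← hr1d, if_pos rfl, hr2c]
    · have : pvGetRoot (pvStepA m (f, (t, c))) p2 = r2 := by
        rw [hGR' p2, ← hr2d]
        by_cases h : r2 = r1 <;> simp [h]
      rw [this, hr2c]
  case bnodup =>
    intro e he
    rcases (hCmem e).mp he with ⟨he', _⟩ | rfl
    · exact hI.bnodup e he'
    · exact hMnd
  case bne =>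
    intro e he
    rcases (hCmem e).mp he with ⟨he', _⟩ | rfl
    · exact hI.bne e he'
    · exact hMne
  case skv =>
    have lift : ∀ x, ((∃ v, m.get? x = some v) ∨ (∃ k, m.get? k = some x)) →
        (∃ v, (pvStepA m (f, (t, c))).get? x = some v) ∨
          (∃ k, (pvStepA m (f, (t, c))).get? k = some x) := by
      rintro x (⟨v, hv⟩ | ⟨k, hk⟩)
      · by_cases hx : x = r1
        · exact Or.inl ⟨r2, by rw [hget' x, if_pos hx]⟩
        · exact Or.inl ⟨v, by rw [hget' x, if_neg hx]; exact hv⟩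
      · by_cases hk1 : k = r1
        · subst hk1
          have hx : x = r1 := by
            rcases hI.wf p1 with hh | hh
            · rw [hh] at hk; simp at hk
            · rw [hh] at hk; injection hk with hk; exact hk.symm
          exact Or.inl ⟨r2, by rw [hget' x, if_pos hx]⟩
        · exact Or.inr ⟨k, by rw [hget' k, if_neg hk1]; exact hk⟩
    rintro x (hx | rfl | rfl)
    · exact lift x (hI.skv x hx)
    · by_cases hs : S p1
      · exact lift p1 (hI.skv p1 hs)
      · have : r1 = p1 := hSeenR1.2 hs
        exact Or.inl ⟨r2, by rw [hget' p1, if_pos this.symm]⟩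
    · by_cases hs : S p2
      · exact lift p2 (hI.skv p2 hs)
      · have : r2 = p2 := hSeenR2.2 hs
        exact Or.inr ⟨r1, by rw [hget' r1, if_pos rfl, this]⟩

def pvNodes (es : List (Int × Int × Int)) : List (Int × Int) :=
  es.flatMap (fun e => [(e.2.2, e.1), (e.2.2, e.2.1)])

theorem pvMemNodes {es : List (Int × Int × Int)} {e : Int × Int × Int} {x : Int × Int} :
    x ∈ pvNodes (e :: es) ↔ x = (e.2.2, e.1) ∨ x = (e.2.2, e.2.1) ∨ x ∈ pvNodes es := by
  simp [pvNodes]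

theorem pvInvCongr {m : PySem.Dict (Int × Int) (Int × Int)} {comps} {S S' : Int × Int → Prop}
    (h : ∀ x, S x ↔ S' x) (hI : PvInv m comps S) : PvInv m comps S' := by
  constructor
  case wf => exact hI.wf
  case keysSeen => intro x v hv; exact (h x).mp (hI.keysSeen x v hv)
  case valsSeen => intro x v hv; exact (h v).mp (hI.valsSeen x v hv)
  case keysNodup => exact hI.keysNodup
  case cover => intro x hx; exact hI.cover x ((h x).mpr hx)
  case bseen => intro e he q hq; exact (h _).mp (hI.bseen e he q hq)
  case bsame => exact hI.bsame
  case bexact => intro e he q hq y hy hr; exact hI.bexact e he q hq y ((h y).mpr hy) hr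
  case comp => intro y hy; exact hI.comp y ((h y).mpr hy)
  case bnodup => exact hI.bnodup
  case bne => exact hI.bne
  case skv => intro x hx; exact hI.skv x ((h x).mpr hx)

theorem pvInvBase : PvInv PySem.Dict.empty [] (fun _ => False) := by
  constructor
  case wf => exact pvWFd_empty
  case keysSeen => intro x v hv; simp at hv
  case valsSeen => intro x v hv; simp at hv
  case keysNodup => exact PySem.Dict.nodup_keys_empty
  case cover => intro x hx; exact hx.elim
  case bseen => intro e he; simp at he
  case bsame => intro e he; simp at he
  case bexact => intro e he; simp at he
  case comp => intro y hy; exact hy.elim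
  case bnodup => intro e he; simp at he
  case bne => intro e he; simp at he
  case skv => intro x hx; exact hx.elim

theorem pvInvFold : ∀ (es : List (Int × Int × Int)) (m : PySem.Dict (Int × Int) (Int × Int))
    (comps : List (Int × PySem.Set Int)) (S : Int × Int → Prop), PvInv m comps S →
    PvInv (es.foldl pvStepA m) (es.foldl pvStepB comps) (fun x => S x ∨ x ∈ pvNodes es) := by
  intro es
  induction es with
  | nil =>
    intro m comps S hI
    simp only [List.foldl_nil]
    exact pvInvCongr (fun x => by simp [pvNodes]) hI
  | cons e es ih =>
    intro m comps S hI
    simp only [List.foldl_cons]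
    have hstep := pvInvStep hI e.1 e.2.1 e.2.2
    have := ih _ _ _ hstep
    refine pvInvCongr (fun x => ?_) this
    rw [pvMemNodes]
    tauto

theorem pvFoldA_wf : ∀ (es : List (Int × Int × Int)) (m : PySem.Dict (Int × Int) (Int × Int)),
    pvWFd m → pvWFd (es.foldl pvStepA m) := by
  intro es
  induction es with
  | nil => intro m h; exact h
  | cons e es ih =>
    intro m h
    exact ih _ (pvStepA_props h e).1

theorem pvRootPreserve : ∀ (es : List (Int × Int × Int)) (m : PySem.Dict (Int × Int) (Int × Int)),
    pvWFd m → ∀ x y, pvGetRoot m x = pvGetRoot m y →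
    pvGetRoot (es.foldl pvStepA m) x = pvGetRoot (es.foldl pvStepA m) y := by
  intro es
  induction es with
  | nil => intro m _ x y h; exact h
  | cons e es ih =>
    intro m hwf x y h
    apply ih _ (pvStepA_props hwf e).1
    rw [(pvStepA_props hwf e).2 x, (pvStepA_props hwf e).2 y, h]

theorem pvConnEdge (l1 : List (Int × Int × Int)) (e : Int × Int × Int) (l2 : List (Int × Int × Int)) :
    pvGetRoot ((l1 ++ e :: l2).foldl pvStepA PySem.Dict.empty) (e.2.2, e.1) =
      pvGetRoot ((l1 ++ e :: l2).foldl pvStepA PySem.Dict.empty) (e.2.2, e.2.1) := by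
  rw [List.foldl_append]
  simp only [List.foldl_cons]
  set m1 := l1.foldl pvStepA PySem.Dict.empty with hm1
  have hwf1 : pvWFd m1 := pvFoldA_wf l1 _ pvWFd_empty
  apply pvRootPreserve l2 _ (pvStepA_props hwf1 e).1
  rw [(pvStepA_props hwf1 e).2 (e.2.2, e.1), (pvStepA_props hwf1 e).2 (e.2.2, e.2.1)]
  by_cases h : pvGetRoot m1 (e.2.2, e.2.1) = pvGetRoot m1 (e.2.2, e.1) <;> simp [h]

-- ===== Section 4: A's groupMap holds exactly the person-sets of the blocks =====

def pvGMStep (m : PySem.Dict (Int × Int) (Int × Int))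
    (g : PySem.Dict (Int × Int) (PySem.Set Int)) (cp : (Int × Int) × (Int × Int)) :
    PySem.Dict (Int × Int) (PySem.Set Int) :=
  let root := pvGetRoot m cp.2
  let group := (g.get? root).getD PySem.Set.empty
  g.insert root (PySem.Set.add (PySem.Set.add group cp.1.2) root.2)

def pvGMChar (m : PySem.Dict (Int × Int) (Int × Int))
    (g : PySem.Dict (Int × Int) (PySem.Set Int))
    (L : List ((Int × Int) × (Int × Int))) : Prop :=
  (∀ r s, g.get? r = some s → (s : List Int).Nodup ∧
    (∀ q, q ∈ (s : List Int) ↔ ∃ kv ∈ L, pvGetRoot m kv.2 = r ∧ (q = kv.1.2 ∨ q = r.2))) ∧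
  (∀ r, (∃ kv ∈ L, pvGetRoot m kv.2 = r) → ∃ s, g.get? r = some s) ∧
  (∀ r s, g.get? r = some s → ∃ kv ∈ L, pvGetRoot m kv.2 = r)

theorem pvGMFold (m : PySem.Dict (Int × Int) (Int × Int)) :
    ∀ (P : List ((Int × Int) × (Int × Int))) (L : List ((Int × Int) × (Int × Int)))
      (g : PySem.Dict (Int × Int) (PySem.Set Int)),
      pvGMChar m g L → pvGMChar m (P.foldl (pvGMStep m) g) (L ++ P) := by
  intro P
  induction P with
  | nil => intro L g h; simpa using h
  | cons kv P ih =>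
    intro L g h
    have hstep : pvGMChar m (pvGMStep m g kv) (L ++ [kv]) := by
      obtain ⟨h1, h2, h3⟩ := h
      set r0 := pvGetRoot m kv.2 with hr0
      set s0 := (g.get? r0).getD PySem.Set.empty with hs0
      have hs0nd : (s0 : List Int).Nodup := by
        rcases hg : g.get? r0 with _ | s
        · rw [hs0, hg]; simp [PySem.Set.empty]
        · rw [hs0, hg]; exact (h1 r0 s hg).1
      have hs0mem : ∀ q, q ∈ (s0 : List Int) ↔
          ∃ kv' ∈ L, pvGetRoot m kv'.2 = r0 ∧ (q = kv'.1.2 ∨ q = r0.2) := by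
        intro q
        rcases hg : g.get? r0 with _ | s
        · rw [hs0, hg]
          simp only [Option.getD_none]
          constructor
          · intro hq; simp [PySem.Set.empty] at hq
          · rintro ⟨kv', hkv', hroot, _⟩
            obtain ⟨s, hs⟩ := h2 r0 ⟨kv', hkv', hroot⟩
            rw [hs] at hg; simp at hg
        · rw [hs0, hg]
          exact (h1 r0 s hg).2 q
      have hget : ∀ r, (pvGMStep m g kv).get? r =
          if r = r0 then some (PySem.Set.add (PySem.Set.add s0 kv.1.2) r0.2) else g.get? r := by
        intro r
        show (g.insert r0 (PySem.Set.add (PySem.Set.add s0 kv.1.2) r0.2)).get? r = _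
        exact PySem.Dict.get?_insert g r0 r _
      refine ⟨?_, ?_, ?_⟩
      · intro r s hs
        rw [hget r] at hs
        by_cases hr : r = r0
        · rw [if_pos hr] at hs
          injection hs with hs
          subst hs
          subst hr
          constructor
          · exact PySem.Set.nodup_add _ _ (PySem.Set.nodup_add _ _ hs0nd)
          · intro q
            rw [PySem.Set.mem_add, PySem.Set.mem_add, hs0mem q]
            constructor
            · rintro ((⟨kv', hkv', hroot, hq⟩ | rfl) | rfl)
              · exact ⟨kv', List.mem_append.mpr (Or.inl hkv'), hroot, hq⟩
              · exact ⟨kv, List.mem_append.mpr (Or.inr (by simp)), rfl, Or.inl rfl⟩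
              · exact ⟨kv, List.mem_append.mpr (Or.inr (by simp)), rfl, Or.inr rfl⟩
            · rintro ⟨kv', hkv', hroot, hq⟩
              rcases List.mem_append.mp hkv' with hkv' | hkv'
              · exact Or.inl (Or.inl ⟨kv', hkv', hroot, hq⟩)
              · rcases List.mem_singleton.mp hkv' with rfl
                rcases hq with rfl | rfl
                · exact Or.inl (Or.inr rfl)
                · exact Or.inr rfl
        · rw [if_neg hr] at hs
          obtain ⟨hnd, hmem⟩ := h1 r s hs
          refine ⟨hnd, fun q => ?_⟩
          rw [hmem q]
          constructor
          · rintro ⟨kv', hkv', hroot, hq⟩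
            exact ⟨kv', List.mem_append.mpr (Or.inl hkv'), hroot, hq⟩
          · rintro ⟨kv', hkv', hroot, hq⟩
            rcases List.mem_append.mp hkv' with hkv' | hkv'
            · exact ⟨kv', hkv', hroot, hq⟩
            · rcases List.mem_singleton.mp hkv' with rfl
              exact absurd hroot.symm hr
      · rintro r ⟨kv', hkv', hroot⟩
        rw [hget r]
        by_cases hr : r = r0
        · rw [if_pos hr]; exact ⟨_, rfl⟩
        · rw [if_neg hr]
          rcases List.mem_append.mp hkv' with hkv' | hkv'
          · exact h2 r ⟨kv', hkv', hroot⟩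
          · rcases List.mem_singleton.mp hkv' with rfl
            exact absurd hroot.symm hr
      · intro r s hs
        rw [hget r] at hs
        by_cases hr : r = r0
        · subst hr
          exact ⟨kv, List.mem_append.mpr (Or.inr (by simp)), rfl⟩
        · rw [if_neg hr] at hs
          obtain ⟨kv', hkv', hroot⟩ := h3 r s hs
          exact ⟨kv', List.mem_append.mpr (Or.inl hkv'), hroot⟩
    have := ih (L ++ [kv]) _ hstep
    simpa using this

def pvGroupMap (m : PySem.Dict (Int × Int) (Int × Int)) :
    PySem.Dict (Int × Int) (PySem.Set Int) :=
  m.items.foldl (pvGMStep m) PySem.Dict.empty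

theorem pvGroupMap_char (m : PySem.Dict (Int × Int) (Int × Int)) :
    pvGMChar m (pvGroupMap m) m.items := by
  have h0 : pvGMChar m PySem.Dict.empty [] := by
    refine ⟨?_, ?_, ?_⟩
    · intro r s hs; simp at hs
    · rintro r ⟨kv, hkv, _⟩; simp at hkv
    · intro r s hs; simp at hs
  simpa using pvGMFold m m.items [] PySem.Dict.empty h0

theorem pvGroupMap_keysNodup (m : PySem.Dict (Int × Int) (Int × Int)) :
    (pvGroupMap m).keys.Nodup := by
  exact PySem.Dict.nodup_keys_foldl_insert_key m.items (fun cp => pvGetRoot m cp.2)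
    (fun g cp => PySem.Set.add (PySem.Set.add ((g.get? (pvGetRoot m cp.2)).getD PySem.Set.empty) cp.1.2)
      (pvGetRoot m cp.2).2)
    PySem.Dict.empty PySem.Dict.nodup_keys_empty

theorem pvGM_values_iff (m : PySem.Dict (Int × Int) (Int × Int)) (s : PySem.Set Int) :
    s ∈ (pvGroupMap m).values ↔ ∃ r, (pvGroupMap m).get? r = some s := by
  constructor
  · intro hs
    simp only [PySem.Dict.values, List.mem_map] at hs
    obtain ⟨p, hp, rfl⟩ := hs
    exact ⟨p.1, PySem.Dict.get?_of_mem_items (pvGroupMap m) hp (pvGroupMap_keysNodup m)⟩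
  · rintro ⟨r, hr⟩
    have := PySem.Dict.mem_items_of_get?_eq_some (pvGroupMap m) hr
    simp only [PySem.Dict.values, List.mem_map]
    exact ⟨(r, s), this, rfl⟩

theorem pvEntryBlock {m : PySem.Dict (Int × Int) (Int × Int)} {comps S}
    (hI : PvInv m comps S) {r : Int × Int} {s : PySem.Set Int}
    (hget : (pvGroupMap m).get? r = some s)
    {e : Int × PySem.Set Int} (he : e ∈ comps) {q0 : Int} (hq0 : q0 ∈ (e.2 : List Int))
    (hroot : pvGetRoot m (e.1, q0) = r) :
    ∀ q, q ∈ (s : List Int) ↔ q ∈ (e.2 : List Int) := by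
  obtain ⟨hc1, hc2, hc3⟩ := pvGroupMap_char m
  intro q
  constructor
  · intro hq
    obtain ⟨kv, hkv, hrkv, hcase⟩ := ((hc1 r s hget).2 q).mp hq
    have hyk : m.get? kv.1 = some kv.2 := PySem.Dict.get?_of_mem_items m hkv hI.keysNodup
    rcases hcase with rfl | rfl
    · have hSy : S kv.1 := hI.keysSeen _ _ hyk
      have hGRy : pvGetRoot m kv.1 = pvGetRoot m (e.1, q0) := by
        rw [pvGetRoot_step hI.wf hyk, hrkv, ← hroot]
      exact (hI.bexact e he q0 hq0 kv.1 hSy hGRy).2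
    · have hSv : S kv.2 := hI.valsSeen _ _ hyk
      have hSr : S r := by
        have := pvRootSeen hI hSv
        rwa [hrkv] at this
      have hRr : pvGetRoot m r = r := by
        have := hI.wf kv.2
        rw [hrkv] at this
        exact pvGetRoot_of_root this
      have hGRr : pvGetRoot m r = pvGetRoot m (e.1, q0) := by rw [hRr, hroot]
      exact (hI.bexact e he q0 hq0 r hSr hGRr).2
  · intro hq
    have hSy : S (e.1, q) := hI.bseen e he q hq
    have hGRy : pvGetRoot m (e.1, q) = r := by
      rw [hI.bsame e he q hq q0 hq0, hroot]
    rcases hky : m.get? (e.1, q) with _ | v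
    · have hRy : pvGetRoot m (e.1, q) = (e.1, q) := pvGetRoot_of_root (Or.inl hky)
      have hyr : (e.1, q) = r := by rw [← hRy, hGRy]
      rcases hI.skv _ hSy with ⟨v, hv⟩ | ⟨k, hk⟩
      · rw [hky] at hv; simp at hv
      · have hkv : (k, (e.1, q)) ∈ m.items := PySem.Dict.mem_items_of_get?_eq_some m hk
        apply ((hc1 r s hget).2 q).mpr
        refine ⟨(k, (e.1, q)), hkv, by simpa using hGRy, Or.inr ?_⟩
        rw [← hyr]
    · have hkv : ((e.1, q), v) ∈ m.items := PySem.Dict.mem_items_of_get?_eq_some m hky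
      apply ((hc1 r s hget).2 q).mpr
      refine ⟨((e.1, q), v), hkv, ?_, Or.inl rfl⟩
      rw [← pvGetRoot_step hI.wf hky]
      exact hGRy

theorem pvBlocksEquiv {m : PySem.Dict (Int × Int) (Int × Int)} {comps S}
    (hI : PvInv m comps S) :
    (∀ s ∈ (pvGroupMap m).values, (s : List Int).Nodup ∧ (s : List Int) ≠ [] ∧
      ∃ h ∈ comps, ∀ q, q ∈ (s : List Int) ↔ q ∈ (h.2 : List Int)) ∧
    (∀ h ∈ comps, ∃ s ∈ (pvGroupMap m).values, ∀ q, q ∈ (s : List Int) ↔ q ∈ (h.2 : List Int)) := by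
  obtain ⟨hc1, hc2, hc3⟩ := pvGroupMap_char m
  constructor
  · intro s hs
    obtain ⟨r, hget⟩ := (pvGM_values_iff m s).mp hs
    obtain ⟨kv, hkv, hrkv⟩ := hc3 r s hget
    have hyk : m.get? kv.1 = some kv.2 := PySem.Dict.get?_of_mem_items m hkv hI.keysNodup
    have hSy : S kv.1 := hI.keysSeen _ _ hyk
    obtain ⟨e, he, he1, he2⟩ := hI.cover kv.1 hSy
    have hroot : pvGetRoot m (e.1, kv.1.2) = r := by
      have : (e.1, kv.1.2) = kv.1 := by rw [he1]
      rw [this, pvGetRoot_step hI.wf hyk, hrkv]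
    refine ⟨(hc1 r s hget).1, ?_, e, he, pvEntryBlock hI hget he he2 hroot⟩
    have : r.2 ∈ (s : List Int) := ((hc1 r s hget).2 r.2).mpr ⟨kv, hkv, hrkv, Or.inr rfl⟩
    intro hnil
    rw [hnil] at this
    simp at this
  · intro h hh
    obtain ⟨q0, hq0⟩ := List.exists_mem_of_ne_nil _ (hI.bne h hh)
    have hSy : S (h.1, q0) := hI.bseen h hh q0 hq0
    have hex : ∃ kv ∈ m.items, pvGetRoot m kv.2 = pvGetRoot m (h.1, q0) := by
      rcases hI.skv _ hSy with ⟨v, hv⟩ | ⟨k, hk⟩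
      · exact ⟨((h.1, q0), v), PySem.Dict.mem_items_of_get?_eq_some m hv,
          (pvGetRoot_step hI.wf hv).symm⟩
      · exact ⟨(k, (h.1, q0)), PySem.Dict.mem_items_of_get?_eq_some m hk, rfl⟩
    obtain ⟨s, hget⟩ := hc2 _ hex
    refine ⟨s, (pvGM_values_iff m s).mpr ⟨_, hget⟩, pvEntryBlock hI hget hh hq0 rfl⟩

-- ===== Section 5: the final max-size / best-product computations =====

theorem pvFoldMax_ge {α : Type} [LinearOrder α] :
    ∀ (L : List α) (z : α), z ≤ L.foldl max z ∧ ∀ x ∈ L, x ≤ L.foldl max z := by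
  intro L
  induction L with
  | nil => intro z; exact ⟨le_refl z, by simp⟩
  | cons a L ih =>
    intro z
    simp only [List.foldl_cons]
    obtain ⟨h1, h2⟩ := ih (max z a)
    refine ⟨le_trans (le_max_left z a) h1, ?_⟩
    intro x hx
    rcases List.mem_cons.mp hx with rfl | hx
    · exact le_trans (le_max_right z x) h1
    · exact h2 x hx

theorem pvFoldMax_cases {α : Type} [LinearOrder α] :
    ∀ (L : List α) (z : α), L.foldl max z = z ∨ L.foldl max z ∈ L := by
  intro L
  induction L with
  | nil => intro z; exact Or.inl rfl
  | cons a L ih =>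
    intro z
    simp only [List.foldl_cons]
    rcases max_choice z a with hc | hc <;> rw [hc]
    · rcases ih z with h | h
      · exact Or.inl h
      · exact Or.inr (List.mem_cons_of_mem _ h)
    · rcases ih a with h | h
      · refine Or.inr ?_
        rw [h]
        exact List.mem_cons_self
      · exact Or.inr (List.mem_cons_of_mem _ h)

theorem pvFoldMax_congr {α : Type} [LinearOrder α] {L1 L2 : List α}
    (h : ∀ x, x ∈ L1 ↔ x ∈ L2) (z : α) : L1.foldl max z = L2.foldl max z := by
  apply le_antisymm
  · rcases pvFoldMax_cases L1 z with hc | hc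
    · rw [hc]; exact (pvFoldMax_ge L2 z).1
    · exact (pvFoldMax_ge L2 z).2 _ ((h _).mp hc)
  · rcases pvFoldMax_cases L2 z with hc | hc
    · rw [hc]; exact (pvFoldMax_ge L1 z).1
    · exact (pvFoldMax_ge L1 z).2 _ ((h _).mpr hc)

-- A's (groups, lenMax) loop keeps exactly the maximum-length values, in order
theorem pvGroupsFold (vs : List (List Int)) :
    (vs.foldl
      (fun (acc : List (List Int) × Nat) v =>
        if v.length > acc.2 then ([v], v.length)
        else if v.length = acc.2 then (acc.1 ++ [v], acc.2)
        else acc)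
      ([], 0)) =
    (vs.filter (fun v => v.length = vs.foldl (fun a v => max a v.length) 0),
     vs.foldl (fun a v => max a v.length) 0) := by
  induction vs using List.reverseRecOn with
  | nil => simp
  | append_singleton vs v ih =>
    have hmap : ∀ (l : List (List Int)) z, l.foldl (fun a v => max a v.length) z =
        (l.map List.length).foldl max z := by
      intro l z
      rw [List.foldl_map]
    rw [List.foldl_append, List.foldl_append, ih]
    simp only [List.foldl_cons, List.foldl_nil]
    set M := vs.foldl (fun a v => max a v.length) 0 with hM
    have hle : ∀ x ∈ vs, x.length ≤ M := by
      intro x hx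
      rw [hM, hmap]
      exact (pvFoldMax_ge (vs.map List.length) 0).2 _ (List.mem_map_of_mem hx)
    by_cases hgt : v.length > M
    · rw [if_pos hgt]
      have hM' : max M v.length = v.length := max_eq_right (le_of_lt hgt)
      have h1 : vs.filter (fun x => x.length = v.length) = [] := by
        rw [List.filter_eq_nil_iff]
        intro x hx
        simp only [decide_eq_true_eq]
        intro hc
        have := hle x hx
        omega
      simp only [hM', List.filter_append, h1]
      simp
    · rw [if_neg hgt]
      by_cases heq : v.length = M
      · rw [if_pos heq]
        have hM' : max M v.length = M := max_eq_left (le_of_eq heq)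
        simp only [hM', List.filter_append]
        simp [heq]
      · rw [if_neg heq]
        have hlt : v.length < M := by omega
        have hM' : max M v.length = M := max_eq_left (le_of_lt hlt)
        simp only [hM', List.filter_append]
        simp [heq]

-- product of the two largest members, A's form and B's form
def pvProdA (g : List Int) : Int :=
  match (PySem.List.sorted g (fun x => x) true).take 2 with
  | [n1, n2] => n1 * n2
  | _ => 0

def pvProdB (h : List Int) : Int :=
  match PySem.List.pyGet? (PySem.List.sorted h (fun x => x) false) (-1),
        PySem.List.pyGet? (PySem.List.sorted h (fun x => x) false) (-2) with
  | some a, some b => a * b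
  | _, _ => 0

theorem pvTopTwo {g h : List Int} (hgnd : g.Nodup) (hhnd : h.Nodup)
    (hmem : ∀ q, q ∈ g ↔ q ∈ h) (hlen : 2 ≤ g.length) :
    ∃ a b, (PySem.List.sorted g (fun x => x) true).take 2 = [a, b] ∧
      PySem.List.pyGet? (PySem.List.sorted h (fun x => x) false) (-1) = some a ∧
      PySem.List.pyGet? (PySem.List.sorted h (fun x => x) false) (-2) = some b := by
  have hperm : h.Perm g := (List.perm_ext_iff_of_nodup hhnd hgnd).mpr (fun q => (hmem q).symm)
  set u := PySem.List.sorted g (fun x => x) false with hu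
  have hsh : PySem.List.sorted h (fun x => x) false = u :=
    PySem.List.sorted_eq_sorted_of_perm h g (fun x => x) (fun a b hab => hab) hperm
  have hup : u.Perm g := PySem.List.sorted_perm g (fun x => x) false
  have hund : u.Nodup := hup.nodup_iff.mpr hgnd
  have hpl : u.Pairwise (· < ·) := by
    have h1 : u.Pairwise (fun a b => a ≤ b) := PySem.List.sorted_pairwise g (fun x => x)
    have h2 : u.Pairwise (· ≠ ·) := hund
    exact (h1.and h2).imp (fun hab => lt_of_le_of_ne hab.1 hab.2)
  have hlu : 2 ≤ u.length := by
    rw [hup.length_eq]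
    exact hlen
  have hrevp : u.reverse.Perm g := (u.reverse_perm).trans hup
  have hrevpw : u.reverse.Pairwise (fun a b => b < a) := by
    rw [List.pairwise_reverse]
    exact hpl
  have hrev : PySem.List.sorted g (fun x => x) true = u.reverse :=
    PySem.List.sorted_rev_eq_of_perm_of_pairwise_gt g u.reverse (fun x => x) hrevp hrevpw
  rcases hur : u.reverse with _ | ⟨a, w⟩
  · exfalso
    have := congrArg List.length hur
    simp only [List.length_reverse, List.length_nil] at this
    omega
  · rcases hw : w with _ | ⟨b, tl⟩
    · exfalso
      have := congrArg List.length hur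
      rw [hw] at this
      simp only [List.length_reverse, List.length_cons, List.length_nil] at this
      omega
    · subst hw
      refine ⟨a, b, ?_, ?_, ?_⟩
      · rw [hrev, hur]; rfl
      · rw [hsh, PySem.List.pyGet?_neg_one, ← List.head?_reverse, hur]
        rfl
      · rw [hsh]
        have hueq : u = tl.reverse ++ [b, a] := by
          rw [← List.reverse_reverse u, hur]
          simp
        rw [PySem.List.pyGet?_neg_ofNat u 2 (by omega) (by simpa using hlu)]
        rw [hueq]
        have hlen2 : (tl.reverse ++ [b, a]).length - 2 = tl.reverse.length := by
          simp
        rw [hlen2, List.getElem?_append_right (le_refl _)]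
        simp

theorem pvFoldA_eq (gs : List (List Int))
    (h : ∀ g ∈ gs, ∃ a b, (PySem.List.sorted g (fun x => x) true).take 2 = [a, b]) :
    ∀ z : Int, gs.foldl
      (fun mp g =>
        match (PySem.List.sorted g (fun x => x) true).take 2 with
        | [n1, n2] => max mp (n1 * n2)
        | _ => mp) z = (gs.map pvProdA).foldl max z := by
  induction gs with
  | nil => intro z; rfl
  | cons g gs ih =>
    intro z
    obtain ⟨a, b, hab⟩ := h g List.mem_cons_self
    have hstep : (match (PySem.List.sorted g (fun x => x) true).take 2 with
        | [n1, n2] => max z (n1 * n2)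
        | _ => z) = max z (a * b) := by rw [hab]
    have hprod : pvProdA g = a * b := by unfold pvProdA; rw [hab]
    simp only [List.foldl_cons, List.map_cons]
    rw [hstep, hprod]
    exact ih (fun g' hg' => h g' (List.mem_cons_of_mem _ hg')) (max z (a * b))

theorem pvFoldFilter {α : Type} (p : α → Prop) [DecidablePred p] (f : Int → α → Int) :
    ∀ (l : List α) (z : Int),
      l.foldl (fun b x => if p x then f b x else b) z = (l.filter (fun x => p x)).foldl f z := by
  intro l
  induction l with
  | nil => intro z; rfl
  | cons x l ih =>
    intro z
    by_cases hx : p x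
    · rw [List.foldl_cons, if_pos hx, List.filter_cons_of_pos (by simpa using hx),
        List.foldl_cons, ih]
    · rw [List.foldl_cons, if_neg hx, List.filter_cons_of_neg (by simpa using hx), ih]

theorem pvTwoMem {l : List Int} {x y : Int} (hx : x ∈ l) (hy : y ∈ l) (hne : x ≠ y) :
    2 ≤ l.length := by
  rcases l with _ | ⟨a, _ | ⟨c, tl⟩⟩
  · simp at hx
  · rw [List.mem_singleton] at hx hy
    exact absurd (hx.trans hy.symm) hne
  · rw [List.length_cons, List.length_cons]
    omega

-- B's inner product loop, over the filtered pair list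
theorem pvFoldBPairs (cs : List (Int × PySem.Set Int))
    (h : ∀ e ∈ cs, ∃ a b,
      PySem.List.pyGet? (PySem.List.sorted (e.2 : List Int) (fun x => x) false) (-1) = some a ∧
      PySem.List.pyGet? (PySem.List.sorted (e.2 : List Int) (fun x => x) false) (-2) = some b) :
    ∀ z : Int, cs.foldl
      (fun best e =>
        match PySem.List.pyGet? (PySem.List.sorted (e.2 : List Int) (fun x => x) false) (-1),
              PySem.List.pyGet? (PySem.List.sorted (e.2 : List Int) (fun x => x) false) (-2) with
        | some a, some b => max best (a * b)
        | _, _ => best) z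
      = (cs.map (fun e => pvProdB (e.2 : List Int))).foldl max z := by
  induction cs with
  | nil => intro z; rfl
  | cons e cs ih =>
    intro z
    obtain ⟨a, b, ha, hb⟩ := h e List.mem_cons_self
    have hstep : (match PySem.List.pyGet? (PySem.List.sorted (e.2 : List Int) (fun x => x) false) (-1),
              PySem.List.pyGet? (PySem.List.sorted (e.2 : List Int) (fun x => x) false) (-2) with
        | some a, some b => max z (a * b)
        | _, _ => z) = max z (a * b) := by rw [ha, hb]
    have hprod : pvProdB (e.2 : List Int) = a * b := by unfold pvProdB; rw [ha, hb]
    simp only [List.foldl_cons, List.map_cons]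
    rw [hstep, hprod]
    exact ih (fun e' he' => h e' (List.mem_cons_of_mem _ he')) (max z (a * b))

-- the common final value, computed from A's group list and from B's block list
theorem pvFinalEq {valsA : List (List Int)} {comps : List (Int × PySem.Set Int)}
    (hA : ∀ g ∈ valsA, g.Nodup ∧ ∃ e ∈ comps, ∀ q, q ∈ g ↔ q ∈ (e.2 : List Int))
    (hB : ∀ e ∈ comps, ∃ g ∈ valsA, ∀ q, q ∈ g ↔ q ∈ (e.2 : List Int))
    (hBnd : ∀ e ∈ comps, (e.2 : List Int).Nodup)
    (h2 : ∃ e ∈ comps, 2 ≤ (e.2 : List Int).length) :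
    ((valsA.filter (fun v => v.length = valsA.foldl (fun a v => max a v.length) 0)).foldl
      (fun mp g =>
        match (PySem.List.sorted g (fun x => x) true).take 2 with
        | [n1, n2] => max mp (n1 * n2)
        | _ => mp) 0) =
    (((comps.filter (fun e => (e.2 : List Int).length =
        (comps.map (fun e => (e.2 : List Int).length)).foldl max 0)).map
      (fun e => pvProdB (e.2 : List Int))).foldl max 0) := by
  have hmatchlen : ∀ (g h : List Int), g.Nodup → h.Nodup → (∀ q, q ∈ g ↔ q ∈ h) →
      g.length = h.length := by
    intro g h hg hh hq
    exact ((List.perm_ext_iff_of_nodup hg hh).mpr hq).length_eq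
  have hlens : ∀ n, n ∈ valsA.map List.length ↔
      n ∈ comps.map (fun e => (e.2 : List Int).length) := by
    intro n
    simp only [List.mem_map]
    constructor
    · rintro ⟨g, hg, rfl⟩
      obtain ⟨hnd, e, he, hq⟩ := hA g hg
      exact ⟨e, he, (hmatchlen g _ hnd (hBnd e he) hq).symm⟩
    · rintro ⟨e, he, rfl⟩
      obtain ⟨g, hg, hq⟩ := hB e he
      exact ⟨g, hg, hmatchlen g _ (hA g hg).1 (hBnd e he) hq⟩
  set M := (comps.map (fun e => (e.2 : List Int).length)).foldl max 0 with hMdef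
  have hMeq : valsA.foldl (fun a v => max a v.length) 0 = M := by
    rw [← List.foldl_map]
    exact pvFoldMax_congr hlens 0
  have hM2 : 2 ≤ M := by
    obtain ⟨e, he, hl⟩ := h2
    refine le_trans hl ((pvFoldMax_ge (comps.map (fun e => (e.2 : List Int).length)) 0).2 _ ?_)
    exact List.mem_map_of_mem he
  have hAshape : ∀ g ∈ valsA.filter (fun v => v.length = valsA.foldl (fun a v => max a v.length) 0),
      ∃ a b, (PySem.List.sorted g (fun x => x) true).take 2 = [a, b] := by
    intro g hg
    obtain ⟨hgm, hglen⟩ := List.mem_filter.mp hg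
    have hglen' : g.length = M := by
      have := of_decide_eq_true hglen
      rwa [hMeq] at this
    obtain ⟨a, b, hab, _, _⟩ := pvTopTwo (hA g hgm).1 (hA g hgm).1 (fun q => Iff.rfl) (by omega)
    exact ⟨a, b, hab⟩
  have hBshape : ∀ e ∈ comps.filter (fun e => (e.2 : List Int).length = M),
      ∃ a b, PySem.List.pyGet? (PySem.List.sorted (e.2 : List Int) (fun x => x) false) (-1) = some a ∧
        PySem.List.pyGet? (PySem.List.sorted (e.2 : List Int) (fun x => x) false) (-2) = some b := by
    intro e he
    obtain ⟨hem, helen⟩ := List.mem_filter.mp he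
    have helen' : (e.2 : List Int).length = M := of_decide_eq_true helen
    obtain ⟨a, b, _, ha, hb⟩ := pvTopTwo (hBnd e hem) (hBnd e hem) (fun q => Iff.rfl) (by omega)
    exact ⟨a, b, ha, hb⟩
  rw [pvFoldA_eq _ hAshape 0]
  apply pvFoldMax_congr
  intro x
  simp only [List.mem_map]
  constructor
  · rintro ⟨g, hg, rfl⟩
    obtain ⟨hgm, hglen⟩ := List.mem_filter.mp hg
    obtain ⟨hnd, e, he, hq⟩ := hA g hgm
    have hglen' : g.length = M := by
      have := of_decide_eq_true hglen
      rwa [hMeq] at this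
    have hel : (e.2 : List Int).length = M := by
      rw [← hmatchlen g _ hnd (hBnd e he) hq, hglen']
    obtain ⟨a, b, hab, ha, hb⟩ := pvTopTwo hnd (hBnd e he) hq (by omega)
    refine ⟨e, List.mem_filter.mpr ⟨he, by simp [hel]⟩, ?_⟩
    have hp1 : pvProdA g = a * b := by unfold pvProdA; rw [hab]
    have hp2 : pvProdB (e.2 : List Int) = a * b := by unfold pvProdB; rw [ha, hb]
    rw [hp1, hp2]
  · rintro ⟨e, he, rfl⟩
    obtain ⟨hem, helen⟩ := List.mem_filter.mp he
    obtain ⟨g, hg, hq⟩ := hB e hem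
    have helen' : (e.2 : List Int).length = M := of_decide_eq_true helen
    have hgl : g.length = M := by
      rw [hmatchlen g _ (hA g hg).1 (hBnd e hem) hq, helen']
    obtain ⟨a, b, hab, ha, hb⟩ := pvTopTwo (hA g hg).1 (hBnd e hem) hq (by omega)
    refine ⟨g, List.mem_filter.mpr ⟨hg, by simp [hMeq, hgl]⟩, ?_⟩
    have hp1 : pvProdA g = a * b := by unfold pvProdA; rw [hab]
    have hp2 : pvProdB (e.2 : List Int) = a * b := by unfold pvProdB; rw [ha, hb]
    rw [hp1, hp2]

theorem pvFoldRangeZip {σ : Type} (g : σ → Int → Int → Int → σ) :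
    ∀ (ff ft fc : List Int) (init : σ), ff.length ≤ ft.length → ff.length ≤ fc.length →
      (List.range ff.length).foldl
        (fun s i => g s (ff.getD i 0) (ft.getD i 0) (fc.getD i 0)) init
        = (ff.zip (ft.zip fc)).foldl (fun s e => g s e.1 e.2.1 e.2.2) init := by
  intro ff
  induction ff with
  | nil => intro ft fc init _ _; rfl
  | cons a ff ih =>
    intro ft fc init h1 h2
    rcases ft with _ | ⟨b, ft⟩
    · simp at h1
    rcases fc with _ | ⟨c, fc⟩
    · simp at h2
    simp only [List.length_cons] at h1 h2
    rw [List.length_cons, List.range_succ_eq_map, List.foldl_cons, List.foldl_map]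
    simp only [List.getD_cons_zero, List.getD_cons_succ]
    rw [List.zip_cons_cons, List.zip_cons_cons, List.foldl_cons]
    exact ih ft fc _ (by omega) (by omega)

theorem pvBuild_eq_zip (ff ft fc : List Int)
    (h1 : ff.length ≤ ft.length) (h2 : ff.length ≤ fc.length) :
    pvBuildRootMap ff ft fc = (ff.zip (ft.zip fc)).foldl pvStepA PySem.Dict.empty := by
  unfold pvBuildRootMap
  simp only [PySem.List.pyGetD_natCast]
  exact pvFoldRangeZip (fun (m : PySem.Dict (Int × Int) (Int × Int)) f t c => m.insert (pvGetRoot m (c, f)) (pvGetRoot m (c, t)))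
    ff ft fc _ h1 h2

theorem pvFoldSnd {α β σ : Type} (g : σ → β → σ) :
    ∀ (l : List (α × β)) (init : σ),
      l.foldl (fun s p => g s p.2) init = (l.map Prod.snd).foldl g init := by
  intro l
  induction l with
  | nil => intro init; rfl
  | cons p l ih => intro init; simp only [List.foldl_cons, List.map_cons]; exact ih _

theorem pvGetMaxGroups_eq (m : PySem.Dict (Int × Int) (Int × Int)) :
    pvGetMaxGroups m =
      ((pvGroupMap m).values).filter
        (fun v => v.length = ((pvGroupMap m).values).foldl (fun a v => max a v.length) 0) := by
  have h1 : pvGetMaxGroups m =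
      (((pvGroupMap m).values).foldl
        (fun (acc : List (List Int) × Nat) v =>
          if v.length > acc.2 then ([v], v.length)
          else if v.length = acc.2 then (acc.1 ++ [v], acc.2) else acc) ([], 0)).1 :=
    congrArg Prod.fst (pvFoldSnd
      (fun (acc : List (List Int) × Nat) v =>
        if v.length > acc.2 then ([v], v.length)
        else if v.length = acc.2 then (acc.1 ++ [v], acc.2) else acc)
      (pvGroupMap m).items ([], 0))
  rw [h1, pvGroupsFold]

theorem pvMergeStep_ne_nil (cs : List (Int × PySem.Set Int)) (f t c : Int) :
    pvMergeStep cs f t c ≠ [] := by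
  obtain ⟨M, _, _, _, hmem⟩ := pvMergeStep_char cs f t c
  intro h
  have : (c, M) ∈ pvMergeStep cs f t c := (hmem _).mpr (Or.inr rfl)
  rw [h] at this
  simp at this

theorem pvFoldB_ne_nil : ∀ (es : List (Int × Int × Int)) (cs : List (Int × PySem.Set Int)),
    es ≠ [] → es.foldl pvStepB cs ≠ [] := by
  intro es
  induction es with
  | nil => intro cs h; exact absurd rfl h
  | cons e es ih =>
    intro cs _
    by_cases hes : es = []
    · subst hes
      simpa using pvMergeStep_ne_nil cs e.1 e.2.1 e.2.2
    · rw [List.foldl_cons]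
      exact ih (pvStepB cs e) hes

theorem pvAltNonempty (nf : Int) (ff ft fc : List Int)
    (h : (ff.zip (ft.zip fc)).foldl pvStepB [] ≠ []) :
    countCompanies_alt nf ff ft fc =
      ((ff.zip (ft.zip fc)).foldl pvStepB []).foldl
        (fun best e =>
          if (e.2 : List Int).length =
              (((ff.zip (ft.zip fc)).foldl pvStepB []).map
                (fun e => (e.2 : List Int).length)).foldl max 0 then
            match PySem.List.pyGet? (PySem.List.sorted (e.2 : List Int) (fun x => x) false) (-1),
                  PySem.List.pyGet? (PySem.List.sorted (e.2 : List Int) (fun x => x) false) (-2) with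
            | some a, some b => max best (a * b)
            | _, _ => best
          else best) 0 := by
  obtain ⟨e0, cs0, hc⟩ := List.exists_cons_of_ne_nil h
  unfold countCompanies_alt
  rw [hc]

theorem pvMain (nf : Int) (ff ft fc : List Int)
    (h1 : ff.length ≤ ft.length) (h2 : ff.length ≤ fc.length)
    (h3 : ff ≠ [] → ∃ i < ff.length, ff.getD i 0 ≠ ft.getD i 0) :
    countCompanies nf ff ft fc = countCompanies_alt nf ff ft fc := by
  by_cases hemp : ff = []
  · subst hemp; rfl
  set es := ff.zip (ft.zip fc) with hes
  have hlenes : es.length = ff.length := by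
    rw [hes, List.length_zip, List.length_zip]
    omega
  have hesne : es ≠ [] := by
    intro h
    rw [h] at hlenes
    simp only [List.length_nil] at hlenes
    exact hemp (List.eq_nil_of_length_eq_zero hlenes.symm)
  set mfin := es.foldl pvStepA PySem.Dict.empty with hmfin
  set comps := es.foldl pvStepB [] with hcomps
  have hcompsne : comps ≠ [] := pvFoldB_ne_nil es [] hesne
  have hInv : PvInv mfin comps (fun x => x ∈ pvNodes es) := by
    have := pvInvFold es PySem.Dict.empty [] (fun _ => False) pvInvBase
    exact pvInvCongr (fun x => by simp) this
  -- the non-self-loop edge yields a block with at least two persons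
  obtain ⟨i, hi, hneq⟩ := h3 hemp
  have hilt : i < es.length := by omega
  have hift : i < ft.length := by omega
  have hifc : i < fc.length := by omega
  have hesi : es[i] = (ff[i], (ft[i], fc[i])) := by
    simp only [hes, List.getElem_zip]
  have hsplit : es = es.take i ++ es[i] :: es.drop (i + 1) := by
    conv_lhs => rw [← List.take_append_drop i es]
    rw [List.getElem_cons_drop]
  have hconn : pvGetRoot mfin (es[i].2.2, es[i].1) = pvGetRoot mfin (es[i].2.2, es[i].2.1) := by
    have hc := pvConnEdge (es.take i) es[i] (es.drop (i + 1))
    rw [← hsplit] at hc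
    exact hc
  have hy1 : (es[i].2.2, es[i].1) ∈ pvNodes es := by
    simp only [pvNodes, List.mem_flatMap]
    exact ⟨es[i], List.getElem_mem _, by simp⟩
  have hy2 : (es[i].2.2, es[i].2.1) ∈ pvNodes es := by
    simp only [pvNodes, List.mem_flatMap]
    exact ⟨es[i], List.getElem_mem _, by simp⟩
  obtain ⟨e, he, he1, he2⟩ := hInv.cover _ hy1
  have hroot : pvGetRoot mfin (es[i].2.2, es[i].2.1) = pvGetRoot mfin (e.1, es[i].1) := by
    have : (e.1, es[i].1) = (es[i].2.2, es[i].1) := by rw [he1]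
    rw [this, ← hconn]
  have hmemy2 : es[i].2.1 ∈ (e.2 : List Int) :=
    (hInv.bexact e he _ he2 _ hy2 hroot).2
  have hneq2 : ff[i] ≠ ft[i] := by
    rw [List.getD_eq_getElem ff 0 hi, List.getD_eq_getElem ft 0 hift] at hneq
    exact hneq
  have hneq' : es[i].1 ≠ es[i].2.1 := by
    rw [hesi]
    exact hneq2
  have h2blk : ∃ e ∈ comps, 2 ≤ (e.2 : List Int).length :=
    ⟨e, he, pvTwoMem he2 hmemy2 hneq'⟩
  -- A's value
  have hbuild : pvBuildRootMap ff ft fc = mfin := pvBuild_eq_zip ff ft fc h1 h2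
  have hAval : countCompanies nf ff ft fc =
      (((pvGroupMap mfin).values).filter
        (fun v => v.length = ((pvGroupMap mfin).values).foldl (fun a v => max a v.length) 0)).foldl
        (fun maxProduct g =>
          match (PySem.List.sorted g (fun x => x) true).take 2 with
          | [n1, n2] => max maxProduct (n1 * n2)
          | _ => maxProduct) 0 := by
    have h0 : countCompanies nf ff ft fc =
        (pvGetMaxGroups (pvBuildRootMap ff ft fc)).foldl
          (fun maxProduct g =>
            match (PySem.List.sorted g (fun x => x) true).take 2 with
            | [n1, n2] => max maxProduct (n1 * n2)
            | _ => maxProduct) 0 := rfl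
    rw [h0, hbuild, pvGetMaxGroups_eq]
  -- B's value
  have hBval : countCompanies_alt nf ff ft fc =
      ((comps.filter (fun e => (e.2 : List Int).length =
          (comps.map (fun e => (e.2 : List Int).length)).foldl max 0)).map
        (fun e => pvProdB (e.2 : List Int))).foldl max 0 := by
    rw [pvAltNonempty nf ff ft fc hcompsne, ← hes, ← hcomps]
    rw [pvFoldFilter (fun e => (e.2 : List Int).length =
        (comps.map (fun e => (e.2 : List Int).length)).foldl max 0)
      (fun best e =>
        match PySem.List.pyGet? (PySem.List.sorted (e.2 : List Int) (fun x => x) false) (-1),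
              PySem.List.pyGet? (PySem.List.sorted (e.2 : List Int) (fun x => x) false) (-2) with
        | some a, some b => max best (a * b)
        | _, _ => best) comps 0]
    apply pvFoldBPairs
    intro e' he'
    obtain ⟨hem, helen⟩ := List.mem_filter.mp he'
    have helen' : (e'.2 : List Int).length =
        (comps.map (fun e => (e.2 : List Int).length)).foldl max 0 := of_decide_eq_true helen
    have hM2 : 2 ≤ (comps.map (fun e => (e.2 : List Int).length)).foldl max 0 := by
      obtain ⟨eb, heb, hl⟩ := h2blk
      exact le_trans hl ((pvFoldMax_ge _ 0).2 _ (List.mem_map_of_mem heb))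
    obtain ⟨a, b, _, ha, hb⟩ := pvTopTwo (hInv.bnodup e' hem) (hInv.bnodup e' hem)
      (fun q => Iff.rfl) (by omega)
    exact ⟨a, b, ha, hb⟩
  rw [hAval, hBval]
  obtain ⟨hbeA, hbeB⟩ := pvBlocksEquiv hInv
  exact pvFinalEq
    (fun g hg => ⟨(hbeA g hg).1, (hbeA g hg).2.2⟩)
    hbeB
    hInv.bnodup
    h2blk

-- ===== VERDICT (by name: the statement is the Claim_ definition above) =====
theorem countCompanies_spec : Claim_equal_countCompanies := by
  intro nf ff ft fc _ hPre
  unfold Spec_countCompanies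
  exact pvMain nf ff ft fc hPre.1 hPre.2.1 hPre.2.2
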